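-- pv_equiv track=rewrite | github.com/mateusz-lisowski/mpwi-labs | lab1/main.py | order_variations
-- ===== SOURCE A (Python) =====
-- def order_variations(variations: list[list]) -> list[list]:
--     variations = variations[:]
--     variations = list(map(lambda li: sorted(li), variations))
--     output: list[list] = []
--     for var in variations:
--         if var not in output:
--             output.append(var)
--     return output
-- ===== SOURCE B (Python) =====
-- def order_variations(variations: list[list]) -> list[list]:
--     # Dedup by forward elimination: take the first key, then delete all its
--     # later duplicates before recursing on what remains (nub-by-filter),
--     # instead of checking each key against the output built so far.
--     keys = [sorted(li) for li in variations]
--     output: list[list] = []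
--     while keys:
--         head = keys[0]
--         output.append(head)
--         keys = [k for k in keys[1:] if k != head]
--     return output
-- ===== Notes on version B (the rewrite author's own statement) =====
-- stated objective: alternative
-- what changed: Deduplicates by forward elimination (nub-by-filter): take the first sorted key, filter all its later duplicates out of the remaining list, repeat; no membership test against the growing output at all.
import Mathlib
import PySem

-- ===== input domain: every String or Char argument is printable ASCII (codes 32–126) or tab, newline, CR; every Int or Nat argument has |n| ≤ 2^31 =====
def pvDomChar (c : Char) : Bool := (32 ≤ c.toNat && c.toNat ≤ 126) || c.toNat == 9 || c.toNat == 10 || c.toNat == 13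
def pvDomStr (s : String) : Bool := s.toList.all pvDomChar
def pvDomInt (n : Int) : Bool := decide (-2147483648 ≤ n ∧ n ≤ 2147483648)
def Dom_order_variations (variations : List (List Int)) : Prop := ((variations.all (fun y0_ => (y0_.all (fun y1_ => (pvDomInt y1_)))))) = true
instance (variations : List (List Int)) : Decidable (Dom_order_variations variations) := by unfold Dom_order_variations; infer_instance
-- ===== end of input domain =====

-- B deduplicates by forward elimination (nub-by-filter) instead of A's membership scan over the output (objective: alternative; same asymptotic cost).

-- ===== PORT A =====
-- variations = variations[:]; variations = list(map(lambda li: sorted(li), variations));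
-- output = []; for var in variations: if var not in output: output.append(var); return output
def order_variations (variations : List (List Int)) : List (List Int) :=
  let variations1 := PySem.List.slice variations none none
  let variations2 := variations1.map (fun li => PySem.List.sorted li (fun x => x) false)
  variations2.foldl (fun output var => if var ∈ output then output else output ++ [var]) []

-- ===== PORT B =====
-- while keys: head = keys[0]; output.append(head); keys = [k for k in keys[1:] if k != head]
-- (the while loop over the shrinking `keys` becomes recursion on `keys`, with the
--  appended `head`s produced as the cons heads of the result)
def pvNubGo : List (List Int) → List (List Int)
  | [] => []
  | head :: rest => head :: pvNubGo (rest.filter (fun k => k ≠ head))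
termination_by l => l.length
decreasing_by
  simp only [List.length_cons, List.length_unattach]
  exact Nat.lt_succ_of_le (le_trans (List.length_filter_le _ _) (by simp))

-- keys = [sorted(li) for li in variations]
def order_variations_alt (variations : List (List Int)) : List (List Int) :=
  pvNubGo (variations.map (fun li => PySem.List.sorted li (fun x => x) false))

-- ===== PRECONDITION & SPEC =====
def Spec_order_variations (variations : List (List Int)) (out : List (List Int)) : Prop := out = order_variations_alt variations
instance (variations : List (List Int)) (out : List (List Int)) : Decidable (Spec_order_variations variations out) := by unfold Spec_order_variations; infer_instance

-- ===== CLAIM (what is proved, stated in full; the proofs are below) =====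
def Claim_equal_order_variations : Prop := ∀ (variations : List (List Int)), Dom_order_variations variations → Spec_order_variations variations (order_variations variations)

-- ===== LEMMAS AND PROOFS =====

-- unfolding lemmas for the well-founded recursion of pvNubGo
theorem pvNubGo_nil : pvNubGo [] = [] := by unfold pvNubGo; rfl

theorem pvNubGo_cons (h : List Int) (t : List (List Int)) :
    pvNubGo (h :: t) = h :: pvNubGo (t.filter (fun k => k ≠ h)) := by
  conv_lhs => unfold pvNubGo

-- A's fold with accumulated output `out` equals `out` followed by the nub of the
-- not-yet-seen keys: the invariant linking the two dedup strategies.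
theorem foldl_dedup_eq_nub (ks : List (List Int)) : ∀ (out : List (List Int)),
    ks.foldl (fun output var => if var ∈ output then output else output ++ [var]) out
      = out ++ pvNubGo (ks.filter (fun k => k ∉ out)) := by
  induction ks with
  | nil => intro out; simp [pvNubGo_nil]
  | cons k t ih =>
      intro out
      by_cases h : k ∈ out
      · rw [List.foldl_cons, if_pos h, List.filter_cons,
          if_neg (by simp [h] : ¬ ((decide (k ∉ out)) = true))]
        exact ih out
      · rw [List.foldl_cons, if_neg h, List.filter_cons,
          if_pos (by simp [h] : (decide (k ∉ out)) = true)]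
        rw [ih (out ++ [k]), pvNubGo_cons, List.filter_filter]
        have hf : (t.filter fun a => decide (a ≠ k) && decide ¬a ∈ out)
            = t.filter (fun a => a ∉ out ++ [k]) := by
          apply List.filter_congr
          intro a _
          simp [List.mem_append, not_or, And.comm]
        rw [hf]
        simp

-- ===== VERDICT (by name: the statement is the Claim_ definition above) =====
theorem order_variations_spec : Claim_equal_order_variations := by
  intro variations _
  unfold Spec_order_variations order_variations order_variations_alt
  simp only [PySem.List.slice]
  rw [foldl_dedup_eq_nub]
  simp
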